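-- pv_equiv track=rewrite | github.com/Arselena/HS_Modul_6_Clean_code | Level_6_4.py | MadMax
-- ===== SOURCE A (Python) =====
-- def MadMax(N, Tele):
--     try:
--         def Max(Mas):
--             CentrElement_val = Mas[0]
--             CentrElement_id = 0
--             for i in range(len(Mas)):
--                 if Mas[i] > CentrElement_val:
--                     CentrElement_val = Mas[i]
--                     CentrElement_id = i
--             return CentrElement_val, CentrElement_id
--
--         assert type(N) is int and N > 0 and N % 2 == 1 and N <= 127  # Проверяем число N (целое, положительное, нечетное)
--         assert len(Tele) == N  # Проверяем, что длина массива = N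
--         for i in range(len(Tele)):
--             assert type(Tele[i]) is int and Tele[i] >= 0 and Tele[i] <= 255 # Проверяем Элемент массива (целое, положительное)
--         for i in range(len(Tele)):  # Проверяем, что массив -- неповторяющиеся цифры
--             for j in range(i+1, len(Tele)):
--                 assert Tele[i] != Tele[j]
--
--         Impuls = []
--
--         for i in range((N + 1) // 2):  # Заполняем правую часть по убыванию
--             CentrElement_val, CentrElement_id = Max(Tele)
--             Impuls.append(CentrElement_val)
--             del Tele[CentrElement_id]
--
--         for i in range((N - 1) // 2):  # Заполняем левую часть по возрастанию
--             CentrElement_val, CentrElement_id = Max(Tele)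
--             Impuls.insert(0,CentrElement_val)
--             del Tele[CentrElement_id]
--
--         return Impuls
--     except AssertionError:
--         pass # Ничего не делать
-- ===== SOURCE B (Python) =====
-- def MadMax(N, Tele):
--     # Note: A empties Tele in place; B does not mutate Tele (return-value equivalence only).
--     if not (type(N) is int and N > 0 and N % 2 == 1 and N <= 127):
--         return None
--     if len(Tele) != N:
--         return None
--     if not all(type(x) is int and 0 <= x <= 255 for x in Tele):
--         return None
--     if len(set(Tele)) != N:
--         return None
--     s = sorted(Tele)
--     k = (N - 1) // 2
--     return s[:k] + s[k:][::-1]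
-- ===== Notes on version B (the rewrite author's own statement) =====
-- stated objective: simpler
-- what changed: Replaces the two selection loops (repeated linear max-scan + del) and the nested-loop distinctness assertion with a single sort plus take/drop/reverse and a set-based distinctness check; returns the same value without mutating Tele (A empties Tele in place).
import Mathlib
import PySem

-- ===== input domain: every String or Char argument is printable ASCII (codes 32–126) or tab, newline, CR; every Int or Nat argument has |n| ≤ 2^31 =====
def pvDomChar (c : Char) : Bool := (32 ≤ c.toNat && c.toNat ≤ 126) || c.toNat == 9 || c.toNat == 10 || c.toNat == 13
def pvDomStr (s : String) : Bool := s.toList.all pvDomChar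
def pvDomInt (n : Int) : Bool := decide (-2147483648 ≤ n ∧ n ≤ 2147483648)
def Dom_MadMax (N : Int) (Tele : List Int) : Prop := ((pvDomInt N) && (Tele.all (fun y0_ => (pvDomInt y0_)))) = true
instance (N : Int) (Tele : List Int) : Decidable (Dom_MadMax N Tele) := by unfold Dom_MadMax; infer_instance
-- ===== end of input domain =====

-- B replaces A's quadratic repeated max-scan-and-delete with one sort plus take/drop/reverse.
-- A empties Tele in place; B does not mutate Tele — the equivalence proved here is about the RETURN value only.

-- ===== PORT A =====
-- inner helper Max(Mas): linear scan for the max value and its index (Mas[0]; callers only pass nonempty lists)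
def aMax (mas : List Int) : Int × Nat :=
  (List.range mas.length).foldl
    (fun st i => if mas.getD i 0 > st.1 then (mas.getD i 0, i) else st)
    (mas.getD 0 0, 0)

-- the nested i<j distinctness assertion loop
def aDistinct : List Int → Bool
  | [] => true
  | x :: xs => xs.all (fun y => x != y) && aDistinct xs

-- first loop: append the max to the right, del Tele[id] (id is in range, so del = eraseIdx)
def aLoop1 : Nat → List Int → List Int → List Int × List Int
  | 0, tele, imp => (tele, imp)
  | k + 1, tele, imp =>
      let (v, id) := aMax tele
      aLoop1 k (tele.eraseIdx id) (imp ++ [v])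

-- second loop: Impuls.insert(0, max), del Tele[id]
def aLoop2 : Nat → List Int → List Int → List Int × List Int
  | 0, tele, imp => (tele, imp)
  | k + 1, tele, imp =>
      let (v, id) := aMax tele
      aLoop2 k (tele.eraseIdx id) (v :: imp)

def MadMax (N : Int) (Tele : List Int) : Option (List Int) :=
  if 0 < N ∧ PySem.Int.mod N 2 = 1 ∧ N ≤ 127 then
    if (Tele.length : Int) = N then
      if ∀ x ∈ Tele, 0 ≤ x ∧ x ≤ 255 then
        if aDistinct Tele then
          let (tele1, imp1) := aLoop1 (PySem.Int.floordiv (N + 1) 2).toNat Tele []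
          let (_, imp2) := aLoop2 (PySem.Int.floordiv (N - 1) 2).toNat tele1 imp1
          some imp2
        else none
      else none
    else none
  else none

-- ===== PORT B =====
def MadMax_alt (N : Int) (Tele : List Int) : Option (List Int) :=
  if (0 < N ∧ PySem.Int.mod N 2 = 1 ∧ N ≤ 127)
      ∧ (Tele.length : Int) = N
      ∧ Tele.all (fun x => decide (0 ≤ x) && decide (x ≤ 255))
      ∧ ((PySem.Set.ofList Tele).length : Int) = N then
    some ((PySem.List.sorted Tele (fun x => x)).take (PySem.Int.floordiv (N - 1) 2).toNat
      ++ ((PySem.List.sorted Tele (fun x => x)).drop (PySem.Int.floordiv (N - 1) 2).toNat).reverse)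
  else none

-- ===== PRECONDITION & SPEC =====
def Spec_MadMax (N : Int) (Tele : List Int) (out : Option (List Int)) : Prop := out = MadMax_alt N Tele
instance (N : Int) (Tele : List Int) (out : Option (List Int)) : Decidable (Spec_MadMax N Tele out) := by unfold Spec_MadMax; infer_instance

-- ===== CLAIM (what is proved, stated in full; the proofs are below) =====
def Claim_equal_MadMax : Prop := ∀ (N : Int) (Tele : List Int), Dom_MadMax N Tele → Spec_MadMax N Tele (MadMax N Tele)

-- ===== LEMMAS AND PROOFS =====

theorem aDistinct_iff (l : List Int) : aDistinct l = true ↔ l.Nodup := by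
  induction l with
  | nil => simp [aDistinct]
  | cons x xs ih =>
      simp only [aDistinct, Bool.and_eq_true, List.all_eq_true, bne_iff_ne, ne_eq,
        List.nodup_cons, ih]
      constructor
      · rintro ⟨h1, h2⟩; exact ⟨fun hm => h1 x hm rfl, h2⟩
      · rintro ⟨h1, h2⟩; exact ⟨fun y hy he => h1 (he ▸ hy), h2⟩

theorem ofList_length_iff (l : List Int) : ((PySem.Set.ofList l).length = l.length) ↔ l.Nodup := by
  constructor
  · intro h
    have hnd := PySem.Set.nodup_ofList (α := Int) l
    have hfin : (PySem.Set.ofList l).toFinset = l.toFinset := by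
      ext a; simp [List.mem_toFinset, PySem.Set.mem_ofList]
    have h1 : (PySem.Set.ofList l).toFinset.card = (PySem.Set.ofList l).length :=
      List.toFinset_card_of_nodup hnd
    have h2 : l.toFinset.card = l.length := by rw [← hfin, h1, h]
    have h3 := Multiset.toFinset_card_eq_card_iff_nodup (m := (l : Multiset Int))
    simpa using h3.mp (by simpa using h2)
  · intro h
    have hperm : (PySem.Set.ofList l).Perm l := by
      rw [List.perm_ext_iff_of_nodup (PySem.Set.nodup_ofList l) h]
      exact fun a => PySem.Set.mem_ofList l a
    exact hperm.length_eq

theorem aMaxFold_spec (mas : List Int) : ∀ n, 1 ≤ n → n ≤ mas.length →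
    ∃ v i, (List.range n).foldl
        (fun st j => if mas.getD j 0 > st.1 then (mas.getD j 0, j) else st)
        (mas.getD 0 0, 0) = (v, i) ∧
      i < n ∧ mas.getD i 0 = v ∧ (∀ j < n, mas.getD j 0 ≤ v) ∧ (∀ j < i, mas.getD j 0 < v) := by
  intro n
  induction n with
  | zero => intro h; omega
  | succ n ih =>
      intro _ hle
      by_cases hn : 1 ≤ n
      · obtain ⟨v, i, heq, hi, hv, hub, hfirst⟩ := ih hn (by omega)
        rw [List.range_succ, List.foldl_append, heq]
        simp only [List.foldl_cons, List.foldl_nil]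
        by_cases hgt : mas.getD n 0 > v
        · refine ⟨mas.getD n 0, n, by rw [if_pos hgt], by omega, rfl, ?_, ?_⟩
          · intro j hj
            rcases Nat.lt_succ_iff_lt_or_eq.mp hj with h | h
            · exact le_of_lt (lt_of_le_of_lt (hub j h) hgt)
            · subst h; exact le_refl _
          · intro j hj; exact lt_of_le_of_lt (hub j hj) hgt
        · refine ⟨v, i, by rw [if_neg hgt], by omega, hv, ?_, hfirst⟩
          intro j hj
          rcases Nat.lt_succ_iff_lt_or_eq.mp hj with h | h
          · exact hub j h
          · subst h; omega
      · have hn0 : n = 0 := by omega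
        subst hn0
        refine ⟨mas.getD 0 0, 0, ?_, Nat.one_pos, rfl, ?_, by omega⟩
        · simp
        · intro j hj
          have : j = 0 := by omega
          subst this; exact le_refl _

theorem aMax_spec (mas : List Int) (hne : mas ≠ []) :
    ∃ v i, aMax mas = (v, i) ∧ i < mas.length ∧ mas.getD i 0 = v ∧
      (∀ j < mas.length, mas.getD j 0 ≤ v) ∧ (∀ j < i, mas.getD j 0 < v) := by
  have hlen : 1 ≤ mas.length := by
    cases mas with
    | nil => exact absurd rfl hne
    | cons a t => simp
  simpa [aMax] using aMaxFold_spec mas mas.length hlen le_rfl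

theorem eraseIdx_eq_erase_of (mas : List Int) (i : Nat) (v : Int)
    (hi : i < mas.length) (hv : mas.getD i 0 = v)
    (hlt : ∀ j < i, mas.getD j 0 ≠ v) : mas.eraseIdx i = mas.erase v := by
  induction mas generalizing i with
  | nil => simp at hi
  | cons a t ih =>
      cases i with
      | zero =>
          simp only [List.getD, List.getElem?_cons_zero, Option.getD_some] at hv
          subst hv
          simp [List.eraseIdx, List.erase_cons_head]
      | succ i =>
          have ha : a ≠ v := by
            have := hlt 0 (Nat.succ_pos _)
            simpa [List.getD] using this
          have hlen : i < t.length := by simpa using hi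
          have hv' : t.getD i 0 = v := by simpa [List.getD] using hv
          have hlt' : ∀ j < i, t.getD j 0 ≠ v := by
            intro j hj
            have := hlt (j + 1) (by omega)
            simpa [List.getD] using this
          rw [List.eraseIdx_cons_succ, ih i hlen hv' hlt', List.erase_cons,
            if_neg (by simp [ha])]

theorem max_split (s : List Int) (v : Int) (hp : s.Pairwise (· < ·)) (hv : v ∈ s)
    (hub : ∀ x ∈ s, x ≤ v) : s = s.dropLast ++ [v] := by
  obtain ⟨p, q, rfl⟩ := List.append_of_mem hv
  have hq : q = [] := by
    cases q with
    | nil => rfl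
    | cons b bq =>
        exfalso
        have hvb : v < b := by
          have := (List.pairwise_append.mp hp).2.1
          exact (List.pairwise_cons.mp this).1 b (by simp)
        have : b ≤ v := hub b (by simp)
        omega
  subst hq
  rw [List.dropLast_concat]

-- one iteration of either loop removes exactly the max of a nonempty Nodup list
theorem step_lemma (tele : List Int) (hne : tele ≠ []) (hnd : tele.Nodup) :
    ∃ v i, aMax tele = (v, i) ∧
      tele.eraseIdx i = tele.erase v ∧
      (tele.erase v).Nodup ∧
      (tele.erase v).length + 1 = tele.length ∧
      PySem.List.sorted tele (fun x => x) =
        PySem.List.sorted (tele.erase v) (fun x => x) ++ [v] := by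
  obtain ⟨v, i, heq, hi, hv, hub, hfirst⟩ := aMax_spec tele hne
  have hvmem : v ∈ tele := by
    rw [← hv, List.getD_eq_getElem _ _ hi]
    exact List.getElem_mem hi
  have hub' : ∀ x ∈ tele, x ≤ v := by
    intro x hx
    obtain ⟨j, hj, rfl⟩ := List.mem_iff_getElem.mp hx
    have := hub j hj
    rwa [List.getD_eq_getElem _ _ hj] at this
  have herase : tele.eraseIdx i = tele.erase v :=
    eraseIdx_eq_erase_of tele i v hi hv (fun j hj => ne_of_lt (hfirst j hj))
  have hnd' : (tele.erase v).Nodup := hnd.erase v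
  have hlen' : (tele.erase v).length + 1 = tele.length := by
    rw [List.length_erase_of_mem hvmem]
    have : 0 < tele.length := List.length_pos_of_mem hvmem
    omega
  refine ⟨v, i, heq, herase, hnd', hlen', ?_⟩
  have hperm : (PySem.List.sorted tele (fun x => x)).Perm tele :=
    PySem.List.sorted_perm tele (fun x => x) false
  have hsnd : (PySem.List.sorted tele (fun x => x)).Nodup := hperm.nodup_iff.mpr hnd
  have hple : (PySem.List.sorted tele (fun x => x)).Pairwise (· ≤ ·) := by
    simpa using PySem.List.sorted_pairwise tele (fun x : Int => x)
  have hplt : (PySem.List.sorted tele (fun x => x)).Pairwise (· < ·) := by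
    have := hple.and hsnd
    exact this.imp (fun h => lt_of_le_of_ne h.1 h.2)
  have hsplit := max_split _ v hplt (hperm.mem_iff.mpr hvmem)
    (fun x hx => hub' x (hperm.subset hx))
  have hvd : v ∉ (PySem.List.sorted tele (fun x => x)).dropLast := by
    intro hmem
    have h2 := hsnd
    rw [hsplit] at h2
    have := (List.nodup_append.mp h2).2.2
    exact this v hmem v (by simp) rfl
  have herase2 : (PySem.List.sorted tele (fun x => x)).erase v
      = (PySem.List.sorted tele (fun x => x)).dropLast := by
    conv_lhs => rw [hsplit]
    rw [List.erase_append_right _ hvd, List.erase_cons_head]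
    simp
  have hperm2 : ((PySem.List.sorted tele (fun x => x)).dropLast).Perm (tele.erase v) := by
    rw [← herase2]; exact hperm.erase v
  have hpl : ((PySem.List.sorted tele (fun x => x)).dropLast).Pairwise (· < ·) :=
    hplt.sublist (List.dropLast_sublist _)
  have hfin : PySem.List.sorted (tele.erase v) (fun x => x)
      = (PySem.List.sorted tele (fun x => x)).dropLast :=
    PySem.List.sorted_eq_of_perm_of_pairwise_lt _ _ _ hperm2 (by simpa using hpl)
  rw [hfin, ← hsplit]

theorem loop1_spec : ∀ (k : Nat) (tele imp : List Int), tele.Nodup → k ≤ tele.length →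
    ∃ r, aLoop1 k tele imp =
        (r, imp ++ ((PySem.List.sorted tele (fun x => x)).drop (tele.length - k)).reverse) ∧
      r.Nodup ∧ r.length = tele.length - k ∧
      PySem.List.sorted r (fun x => x)
        = (PySem.List.sorted tele (fun x => x)).take (tele.length - k) := by
  intro k
  induction k with
  | zero =>
      intro tele imp hnd _
      refine ⟨tele, ?_, hnd, by omega, ?_⟩
      · simp [aLoop1]
      · rw [Nat.sub_zero, ← PySem.List.length_sorted tele (fun x : Int => x) false,
          List.take_length]
  | succ k ih =>
      intro tele imp hnd hle
      have hne : tele ≠ [] := by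
        intro h; subst h; simp at hle
      obtain ⟨v, i, heq, herase, hnd', hlen', hsplit⟩ := step_lemma tele hne hnd
      obtain ⟨r, hr, hrnd, hrlen, hrsort⟩ := ih (tele.erase v) (imp ++ [v]) hnd' (by omega)
      have hslen : (PySem.List.sorted (tele.erase v) (fun x : Int => x)).length
          = (tele.erase v).length := PySem.List.length_sorted _ _ _
      have hm : tele.length - (k + 1) = (tele.erase v).length - k := by omega
      have hm' : (tele.erase v).length - k
          ≤ (PySem.List.sorted (tele.erase v) (fun x : Int => x)).length := by omega
      refine ⟨r, ?_, hrnd, by omega, ?_⟩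
      · simp only [aLoop1, heq]
        rw [herase, hr, hsplit, hm, List.drop_append_of_le_length hm',
          List.reverse_append]
        simp
      · rw [hrsort, hsplit, hm, List.take_append_of_le_length hm']

theorem loop2_spec : ∀ (n : Nat) (tele imp : List Int), tele.Nodup → n = tele.length →
    (aLoop2 n tele imp).2 = PySem.List.sorted tele (fun x => x) ++ imp := by
  intro n
  induction n with
  | zero =>
      intro tele imp _ hlen
      have : tele = [] := List.eq_nil_of_length_eq_zero hlen.symm
      subst this
      rfl
  | succ n ih =>
      intro tele imp hnd hlen
      have hne : tele ≠ [] := by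
        intro h; subst h; simp at hlen
      obtain ⟨v, i, heq, herase, hnd', hlen', hsplit⟩ := step_lemma tele hne hnd
      simp only [aLoop2, heq]
      rw [herase, ih (tele.erase v) (v :: imp) hnd' (by omega), hsplit]
      simp

-- ===== VERDICT (by name: the statement is the Claim_ definition above) =====
theorem MadMax_spec : Claim_equal_MadMax := by
  intro N Tele _
  unfold Spec_MadMax MadMax MadMax_alt
  by_cases h1 : 0 < N ∧ PySem.Int.mod N 2 = 1 ∧ N ≤ 127
  · by_cases h2 : (Tele.length : Int) = N
    · by_cases h3 : ∀ x ∈ Tele, 0 ≤ x ∧ x ≤ 255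
      · by_cases h4 : Tele.Nodup
        · -- all asserts pass on both sides
          have hb3 : Tele.all (fun x => decide (0 ≤ x) && decide (x ≤ 255)) = true := by
            simp only [List.all_eq_true, Bool.and_eq_true, decide_eq_true_eq]
            exact h3
          have hb4 : ((PySem.Set.ofList Tele).length : Int) = N := by
            rw [(ofList_length_iff Tele).mpr h4]; exact h2
          rw [if_pos h1, if_pos h2, if_pos h3, if_pos ((aDistinct_iff Tele).mpr h4),
            if_pos ⟨h1, h2, hb3, hb4⟩]
          have hmodN : N % 2 = 1 := by
            have h := h1.2.1
            simp only [PySem.Int.mod] at h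
            rw [Int.fmod_eq_emod] at h
            omega
          have hfd1 : PySem.Int.floordiv (N + 1) 2 = (N + 1) / 2 := by
            simp [PySem.Int.floordiv, Int.fdiv_eq_ediv]
          have hfd2 : PySem.Int.floordiv (N - 1) 2 = (N - 1) / 2 := by
            simp [PySem.Int.floordiv, Int.fdiv_eq_ediv]
          have hk1 : (PySem.Int.floordiv (N + 1) 2).toNat ≤ Tele.length := by
            rw [hfd1]; omega
          have hk2 : Tele.length - (PySem.Int.floordiv (N + 1) 2).toNat
              = (PySem.Int.floordiv (N - 1) 2).toNat := by
            rw [hfd1, hfd2]; omega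
          obtain ⟨r, hr, hrnd, hrlen, hrsort⟩ :=
            loop1_spec (PySem.Int.floordiv (N + 1) 2).toNat Tele [] h4 hk1
          have h2' := loop2_spec (PySem.Int.floordiv (N - 1) 2).toNat r
            ((PySem.List.sorted Tele (fun x => x)).drop
              (Tele.length - (PySem.Int.floordiv (N + 1) 2).toNat)).reverse hrnd (by omega)
          simp only [hr, List.nil_append]
          rw [hk2] at h2' hrsort
          rw [hk2, h2', hrsort]
        · rw [if_pos h1, if_pos h2, if_pos h3,
            if_neg (by simpa [aDistinct_iff] using h4),
            if_neg (by
              rintro ⟨-, -, -, hb⟩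
              exact h4 ((ofList_length_iff Tele).mp (by omega)))]
      · rw [if_pos h1, if_pos h2, if_neg h3, if_neg (by
          rintro ⟨-, -, hb, -⟩
          exact h3 (by simpa only [List.all_eq_true, Bool.and_eq_true,
            decide_eq_true_eq] using hb))]
    · rw [if_pos h1, if_neg h2, if_neg (by rintro ⟨-, hb, -⟩; exact h2 hb)]
  · rw [if_neg h1, if_neg (by rintro ⟨hb, -⟩; exact h1 hb)]
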